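-- pv_equiv track=rewrite | github.com/AA-Hamza/Problem-solving | codeforces/multiplication_dilemaa.py | solve
-- ===== SOURCE A (Python) =====
-- def construct_term(power, multiple, negative):
--     return f"{power} x {'-' if negative else ''}{multiple}"
--
-- def solve(m):
--     negative = False
--     if (m < 0):
--         negative = True
--         m = abs(m)
--     l = []
--     start = len(str(m))-1
--     tens = 10**start
--     while (m != 0):
--         l.append((tens, m // tens))
--         m %= tens
--         tens //= 10
--     result = []
--     for power, multiple in l:
--         if (multiple):
--             result.append(construct_term(power, multiple, negative))
--             result.append('+')
--     return ' '.join(result[:-1])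
-- ===== SOURCE B (Python) =====
-- def solve(m):
--     sign = '-' if m < 0 else ''
--     s = str(abs(m))
--     terms = [f"{10 ** (len(s) - 1 - i)} x {sign}{d}" for i, d in enumerate(s) if d != '0']
--     return ' + '.join(terms)
-- ===== Notes on version B (the rewrite author's own statement) =====
-- stated objective: simpler
-- what changed: B replaces A's div/mod place-value extraction loop plus intermediate (power, multiple) tuple list plus second filtering loop (with '+' tokens interleaved and stripped) by a single comprehension over the decimal digit string, collecting term strings for nonzero digits and joining them with ' + '.
import Mathlib
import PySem

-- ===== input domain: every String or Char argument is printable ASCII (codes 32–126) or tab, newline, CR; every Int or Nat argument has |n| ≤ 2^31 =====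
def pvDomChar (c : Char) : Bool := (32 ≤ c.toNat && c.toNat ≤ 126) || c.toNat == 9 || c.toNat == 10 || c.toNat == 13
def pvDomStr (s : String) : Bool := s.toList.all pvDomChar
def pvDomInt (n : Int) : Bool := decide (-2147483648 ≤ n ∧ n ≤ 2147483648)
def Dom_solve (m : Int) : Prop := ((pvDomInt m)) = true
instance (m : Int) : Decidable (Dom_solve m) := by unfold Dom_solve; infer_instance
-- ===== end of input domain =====

-- B builds the place-value terms in one comprehension over the digit string instead of
-- A's div/mod extraction loop + tuple list + second filtering loop; equality of return
-- values is proved for ALL Int inputs (A is total, no Pre_).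

-- ===== PORT A =====
def construct_term (power multiple : Int) (negative : Bool) : String :=
  PySem.Int.toStr power ++ " x " ++ (if negative then "-" else "") ++ PySem.Int.toStr multiple

-- the while loop of A; the '0 < tens' conjunct is only a totality guard for the
-- recursion (on every state the Python loop reaches, tens > 0 whenever m ≠ 0)
def solveLoop (m tens : Int) : List (Int × Int) :=
  if m ≠ 0 ∧ 0 < tens then
    (tens, PySem.Int.floordiv m tens) ::
      solveLoop (PySem.Int.mod m tens) (PySem.Int.floordiv tens 10)
  else []
termination_by tens.toNat
decreasing_by
  rename_i h
  have h10 : PySem.Int.floordiv tens 10 = tens / 10 := by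
    simp [PySem.Int.floordiv, Int.fdiv_eq_ediv]
  rw [h10]; omega

def solve (m : Int) : String :=
  let negative : Bool := decide (m < 0)
  let m1 : Int := if m < 0 then |m| else m
  let start : Int := PySem.Str.len (PySem.Int.toStr m1) - 1
  let tens : Int := (10 : Int) ^ start.toNat    -- start ≥ 0: str(m1) is never empty
  let l : List (Int × Int) := solveLoop m1 tens
  let result : List String := l.foldl (fun acc pm =>
    if pm.2 ≠ 0 then acc ++ [construct_term pm.1 pm.2 negative, "+"] else acc) []
  PySem.Str.join " " (PySem.List.slice result none (some (-1)))

-- ===== PORT B =====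
def solve_alt (m : Int) : String :=
  let sign : String := if m < 0 then "-" else ""
  let s : String := PySem.Int.toStr |m|
  let terms : List String := (PySem.List.enumerate s.toList).filterMap (fun p =>
    if p.2 ≠ '0' then
      some (PySem.Int.toStr ((10 : Int) ^ (PySem.Str.len s - 1 - p.1).toNat) ++ " x " ++
        sign ++ String.singleton p.2)
    else none)
  PySem.Str.join " + " terms

-- ===== PRECONDITION & SPEC =====
def Spec_solve (m : Int) (out : String) : Prop := out = solve_alt m
instance (m : Int) (out : String) : Decidable (Spec_solve m out) := by unfold Spec_solve; infer_instance

-- ===== CLAIM (what is proved, stated in full; the proofs are below) =====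
def Claim_equal_solve : Prop := ∀ (m : Int), Dom_solve m → Spec_solve m (solve m)

-- ===== LEMMAS AND PROOFS =====

-- the k+1 digit characters of n (n < 10^(k+1)), most significant first, with leading zeros
def digs : Nat → Nat → List Char
  | 0, n => [Nat.digitChar n]
  | k+1, n => Nat.digitChar (n / 10 ^ (k+1)) :: digs k (n % 10 ^ (k+1))

-- the list of place-value term strings of n over digit positions k, k-1, …, 0
def termList (sign : String) : Nat → Nat → List String
  | 0, n => if n = 0 then [] else
      [PySem.Int.toStr 1 ++ " x " ++ sign ++ PySem.Int.toStr (n : Int)]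
  | k+1, n =>
      (if n / 10 ^ (k+1) = 0 then [] else
        [PySem.Int.toStr ((10 : Int) ^ (k+1)) ++ " x " ++ sign ++
          PySem.Int.toStr ((n / 10 ^ (k+1) : Nat) : Int)]) ++
      termList sign k (n % 10 ^ (k+1))

lemma termList_zero (sign : String) : ∀ k, termList sign k 0 = [] := by
  intro k; induction k with
  | zero => simp [termList]
  | succ k ih => simp [termList, ih]

lemma digs_succ (k n : Nat) :
    digs (k+1) n = digs k (n / 10) ++ [Nat.digitChar (n % 10)] := by
  induction k generalizing n with
  | zero => simp [digs]
  | succ k ih =>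
    have h1 : n % 10 ^ (k+1+1) % 10 = n % 10 :=
      Nat.mod_mod_of_dvd n ⟨10 ^ (k+1), by ring⟩
    have h2 : n % 10 ^ (k+1+1) / 10 = n / 10 % 10 ^ (k+1) := by
      rw [show (10:Nat) ^ (k+1+1) = 10 * 10 ^ (k+1) by ring]
      exact Nat.mod_mul_right_div_self n 10 (10 ^ (k+1))
    have h3 : n / 10 ^ (k+1+1) = n / 10 / 10 ^ (k+1) := by
      rw [Nat.div_div_eq_div_mul, show (10:Nat) * 10 ^ (k+1) = 10 ^ (k+1+1) by ring]
    show Nat.digitChar (n / 10 ^ (k+1+1)) :: digs (k+1) (n % 10 ^ (k+1+1))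
      = Nat.digitChar (n / 10 / 10 ^ (k+1)) ::
        (digs k (n / 10 % 10 ^ (k+1)) ++ [Nat.digitChar (n % 10)])
    rw [h3, ih (n % 10 ^ (k+1+1)), h1, h2]

lemma toDigits_eq_digs : ∀ (k n : Nat), n < 10 ^ (k+1) → (10 ^ k ≤ n ∨ k = 0) →
    Nat.toDigits 10 n = digs k n := by
  intro k
  induction k with
  | zero =>
    intro n h _
    have h' : n < 10 := by simpa using h
    rw [Nat.toDigits_of_lt_base h']; rfl
  | succ k ih =>
    intro n hlt hge
    have h10 : 10 ≤ n := by
      rcases hge with h | h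
      · calc 10 = 10 ^ 1 := by norm_num
          _ ≤ 10 ^ (k+1) := Nat.pow_le_pow_right (by norm_num) (by omega)
          _ ≤ n := h
      · omega
    have hdiv_lt : n / 10 < 10 ^ (k+1) := by
      rw [Nat.div_lt_iff_lt_mul (by norm_num)]
      calc n < 10 ^ (k+2) := hlt
        _ = 10 ^ (k+1) * 10 := by ring
    have hdiv_ge : 10 ^ k ≤ n / 10 ∨ k = 0 := by
      rcases hge with h | h
      · left
        rw [Nat.le_div_iff_mul_le (by norm_num)]
        calc 10 ^ k * 10 = 10 ^ (k+1) := by ring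
          _ ≤ n := h
      · omega
    rw [Nat.toDigits_eq_if (by norm_num : (1:Nat) < 10)]
    rw [if_neg (by omega), ih (n / 10) hdiv_lt hdiv_ge, digs_succ]

lemma digitChar_eq_zero_iff (d : Nat) (hd : d < 10) : Nat.digitChar d = '0' ↔ d = 0 := by
  interval_cases d <;> simp <;> decide

lemma singleton_digitChar (d : Nat) (hd : d < 10) :
    String.singleton (Nat.digitChar d) = PySem.Int.toStr (d : Int) := by
  interval_cases d <;> decide

-- B's comprehension over the digit list produces exactly termList
lemma termsB (sign : String) : ∀ (k n a : Nat) (E : Int), E = a + k → n < 10 ^ (k+1) →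
    (PySem.List.enumerate (digs k n) (a : Int)).filterMap (fun p =>
      if p.2 ≠ '0' then
        some (PySem.Int.toStr ((10 : Int) ^ (E - p.1).toNat) ++ " x " ++ sign ++
          String.singleton p.2)
      else none) = termList sign k n := by
  intro k
  induction k with
  | zero =>
    intro n a E hE hn
    replace hn : n < 10 := by simpa using hn
    have hEa : (E - (a : Int)).toNat = 0 := by omega
    simp only [digs, PySem.List.enumerate_cons, PySem.List.enumerate_nil,
      List.filterMap_cons, List.filterMap_nil, termList, hEa, pow_zero]
    by_cases h0 : n = 0
    · subst h0; simp [show Nat.digitChar 0 = '0' from rfl]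
    · rw [if_pos (by rw [ne_eq, digitChar_eq_zero_iff n hn]; exact h0), if_neg h0,
        singleton_digitChar n hn]
  | succ k ih =>
    intro n a E hE hn
    have hq : n / 10 ^ (k+1) < 10 :=
      Nat.div_lt_of_lt_mul (by calc n < 10 ^ (k+1+1) := hn
        _ = 10 ^ (k+1) * 10 := by ring)
    have hEa : (E - (a : Int)).toNat = k + 1 := by omega
    have hr : n % 10 ^ (k+1) < 10 ^ (k+1) := Nat.mod_lt _ (by positivity)
    have hIH := ih (n % 10 ^ (k+1)) (a+1) E (by push_cast; omega) hr
    push_cast at hIH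
    simp only [digs, PySem.List.enumerate_cons, List.filterMap_cons, termList, hEa, hIH]
    by_cases h0 : n / 10 ^ (k+1) = 0
    · rw [if_neg (by rw [ne_eq, digitChar_eq_zero_iff _ hq]; exact fun h => h h0 |>.elim ),
        if_pos h0]
      · simp
    · rw [if_pos (by rw [ne_eq, digitChar_eq_zero_iff _ hq]; exact h0), if_neg h0,
        singleton_digitChar _ hq]
      simp

-- A's while loop + filtering fold produces termList interleaved with "+" tokens
lemma loopA (neg : Bool) : ∀ (k n : Nat) (acc : List String), n < 10 ^ (k+1) →
    (solveLoop (n : Int) ((10 : Int) ^ k)).foldl (fun acc pm =>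
        if pm.2 ≠ 0 then acc ++ [construct_term pm.1 pm.2 neg, "+"] else acc) acc
      = acc ++ (termList (if neg then "-" else "") k n).flatMap (fun t => [t, "+"]) := by
  intro k
  induction k with
  | zero =>
    intro n acc hn
    replace hn : n < 10 := by simpa using hn
    by_cases h0 : n = 0
    · subst h0
      rw [solveLoop]
      simp [termList]
    · simp only [pow_zero]
      rw [solveLoop, if_pos ⟨by exact_mod_cast h0, by norm_num⟩, solveLoop]
      rw [show PySem.Int.floordiv (1 : Int) 10 = 0 from by decide]
      simp only [lt_irrefl, and_false, if_false, Int.fdiv_one,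
        PySem.Int.floordiv, PySem.Int.mod, Int.fmod_one, List.foldl_cons, List.foldl_nil]
      rw [if_pos (by exact_mod_cast h0)]
      simp [termList, h0, construct_term]
  | succ k ih =>
    intro n acc hn
    by_cases h0 : n = 0
    · subst h0
      rw [solveLoop]
      simp [termList_zero]
    · have hpow : ((10 : Int) ^ (k+1)) = ((10 ^ (k+1) : Nat) : Int) := by push_cast; ring
      have hfdiv : PySem.Int.floordiv (n : Int) ((10 : Int) ^ (k+1))
          = ((n / 10 ^ (k+1) : Nat) : Int) := by
        rw [hpow]
        simp [PySem.Int.floordiv, Int.fdiv_eq_ediv]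
      have hfmod : PySem.Int.mod (n : Int) ((10 : Int) ^ (k+1))
          = ((n % 10 ^ (k+1) : Nat) : Int) := by
        rw [hpow]
        simp [PySem.Int.mod, Int.fmod_eq_emod]
      have htens : PySem.Int.floordiv ((10 : Int) ^ (k+1)) 10 = (10 : Int) ^ k := by
        have : ((10 : Int) ^ (k+1)) = ((10 : Int) ^ k) * 10 := by ring
        rw [this]
        simp [PySem.Int.floordiv, Int.fdiv_eq_ediv]
      have hr : n % 10 ^ (k+1) < 10 ^ (k+1) := Nat.mod_lt _ (by positivity)
      rw [solveLoop, if_pos ⟨by exact_mod_cast h0, by positivity⟩, hfdiv, hfmod, htens]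
      rw [List.foldl_cons, ih (n % 10 ^ (k+1)) _ hr]
      simp only [termList, List.flatMap_append]
      by_cases hq : n / 10 ^ (k+1) = 0
      · rw [if_neg (by simp [hq]), if_pos hq]
        simp
      · rw [if_pos (by exact_mod_cast hq), if_neg hq]
        simp [construct_term, List.append_assoc]

-- ' '.join of the "+"-interleaved list with its trailing "+" dropped  =  ' + '.join
lemma joinChars : ∀ (ls : List (List Char)),
    PySem.Chars.join [' '] ((ls.flatMap fun l => [l, ['+']]).dropLast)
      = PySem.Chars.join [' ', '+', ' '] ls := by
  intro ls
  induction ls with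
  | nil =>
    rw [List.flatMap_nil, List.dropLast_nil, PySem.Chars.join_nil, PySem.Chars.join_nil]
  | cons l ls ih =>
    cases ls with
    | nil =>
      rw [show (List.flatMap (fun l => [l, ['+']]) [l]).dropLast = [l] from rfl,
        PySem.Chars.join_singleton, PySem.Chars.join_singleton]
    | cons l' ls' =>
      have hstep2 : (List.flatMap (fun t => [t, ['+']]) (l' :: ls')).dropLast
          = l' :: ((['+'] :: List.flatMap (fun t => [t, ['+']]) ls').dropLast) := by
        simp [List.flatMap_cons, List.dropLast_cons₂]
      have hstep : (List.flatMap (fun t => [t, ['+']]) (l :: l' :: ls')).dropLast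
          = l :: ['+'] :: l' :: ((['+'] :: List.flatMap (fun t => [t, ['+']]) ls').dropLast) := by
        simp [List.flatMap_cons, List.dropLast_cons₂]
      rw [hstep2] at ih
      conv_lhs => rw [hstep, PySem.Chars.join_cons_cons, PySem.Chars.join_cons_cons]
      conv_rhs => rw [PySem.Chars.join_cons_cons]
      rw [← ih]
      simp [List.append_assoc]

lemma joinPlus (ts : List String) :
    PySem.Str.join " " ((ts.flatMap fun t => [t, "+"]).dropLast)
      = PySem.Str.join " + " ts := by
  have h1 : (" " : String).toList = [' '] := rfl
  have h2 : (" + " : String).toList = [' ', '+', ' '] := rfl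
  simp only [PySem.Str.join, h1, h2]
  congr 1
  have hm : (ts.flatMap fun t => [t, "+"]).map String.toList
      = (ts.map String.toList).flatMap fun l => [l, ['+']] := by
    induction ts with
    | nil => rfl
    | cons t ts ih => simp [List.flatMap_cons, ih]
  rw [List.map_dropLast, hm, joinChars]

lemma solve_eq_solve_alt (m : Int) : solve m = solve_alt m := by
  set n : Nat := m.natAbs with hn
  have habs : |m| = (n : Int) := Int.abs_eq_natAbs m
  have hm1 : (if m < 0 then |m| else m) = (n : Int) := by
    rw [habs]; split <;> omega
  have hchars : (PySem.Int.toStr (n : Int)).toList = Nat.toDigits 10 n := by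
    rw [PySem.Int.toList_toStr]
    simp [PySem.Int.toChars]
  set k : Nat := (Nat.toDigits 10 n).length - 1 with hk
  have hlenpos : 0 < (Nat.toDigits 10 n).length := Nat.length_toDigits_pos
  have hlen : (Nat.toDigits 10 n).length = k + 1 := by omega
  have hnlt : n < 10 ^ (k+1) := by
    rw [← Nat.length_toDigits_le_iff (by norm_num) (by omega)]
    omega
  have hside : 10 ^ k ≤ n ∨ k = 0 := by
    by_cases hk0 : k = 0
    · right; exact hk0
    · left
      by_contra hcon
      push Not at hcon
      have := (Nat.length_toDigits_le_iff (b := 10) (n := n) (k := k)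
        (by norm_num) (by omega)).mpr hcon
      omega
  have hdigs : Nat.toDigits 10 n = digs k n := toDigits_eq_digs k n hnlt hside
  have hsign : (if decide (m < 0) = true then "-" else "")
      = (if m < 0 then ("-" : String) else "") := by
    by_cases h : m < 0 <;> simp [h]
  -- A side
  show (let negative : Bool := decide (m < 0);
    let m1 : Int := if m < 0 then |m| else m;
    let start : Int := PySem.Str.len (PySem.Int.toStr m1) - 1;
    let tens : Int := (10 : Int) ^ start.toNat;
    let l : List (Int × Int) := solveLoop m1 tens;
    let result : List String := l.foldl (fun acc pm =>
      if pm.2 ≠ 0 then acc ++ [construct_term pm.1 pm.2 negative, "+"] else acc) [];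
    PySem.Str.join " " (PySem.List.slice result none (some (-1)))) = solve_alt m
  simp only [hm1]
  have hslen : PySem.Str.len (PySem.Int.toStr (n : Int)) = ((k : Int) + 1) := by
    rw [PySem.Str.len_eq, hchars, hlen]; push_cast; ring
  have hstart : ((PySem.Str.len (PySem.Int.toStr (n : Int)) - 1)).toNat = k := by
    rw [hslen]; omega
  rw [hstart, loopA (decide (m < 0)) k n [] hnlt, hsign]
  rw [PySem.List.slice_to_neg_one, List.nil_append, joinPlus]
  -- B side
  show _ = (let sign : String := if m < 0 then "-" else "";
    let s : String := PySem.Int.toStr |m|;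
    let terms : List String := (PySem.List.enumerate s.toList).filterMap (fun p =>
      if p.2 ≠ '0' then
        some (PySem.Int.toStr ((10 : Int) ^ (PySem.Str.len s - 1 - p.1).toNat) ++ " x " ++
          (if m < 0 then "-" else "") ++ String.singleton p.2)
      else none);
    PySem.Str.join " + " terms)
  simp only [habs]
  congr 1
  rw [hchars, hdigs]
  have := termsB (if m < 0 then "-" else "") k n 0
    (PySem.Str.len (PySem.Int.toStr (n : Int)) - 1) (by rw [hslen]; push_cast; ring) hnlt
  rw [← this]
  rfl

-- ===== VERDICT (by name: the statement is the Claim_ definition above) =====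
theorem solve_spec : Claim_equal_solve := by
  intro m _
  unfold Spec_solve
  exact solve_eq_solve_alt m
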